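-- pv_equiv track=rewrite | github.com/Moonspot011/Procesador_de_Gram-ticas-G1_a_G5- | gramatica.py | check_g2
-- ===== SOURCE A (Python) =====
-- def check_g2(input_string):
--     """L(G2): a^n b^{n+1} donde n >= 0"""
--     # Caso especial para solo "b"
--     if input_string == "b":
--         return True
--
--     # Verificar que solo contiene 'a's y 'b's
--     if not all(c in 'ab' for c in input_string):
--         return False
--
--     # Verificar que todas las 'a's están primero
--     if 'ba' in input_string:
--         return False
--
--     a_count = input_string.count('a')
--     b_count = input_string.count('b')
--
--     return b_count == a_count + 1
-- ===== SOURCE B (Python) =====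
-- def check_g2(input_string):
--     """L(G2): a^n b^{n+1} donde n >= 0 -- single forward scan, two-phase state machine."""
--     i = 0
--     n = len(input_string)
--     # phase 1: consume leading 'a's
--     while i < n and input_string[i] == 'a':
--         i += 1
--     a = i
--     # phase 2: everything remaining must be 'b'
--     b = 0
--     while i < n:
--         if input_string[i] != 'b':
--             return False
--         b += 1
--         i += 1
--     return b == a + 1
-- ===== Notes on version B (the rewrite author's own statement) =====
-- stated objective: alternative
-- what changed: Replaced A's four separate library scans (an all() membership pass, a substring-order check, and two count() calls) plus its single-letter special case by one stateful forward scan: a two-phase state machine that counts leading a-characters, then requires every remaining character to be a b-character while counting them, returning b == a + 1.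
import Mathlib
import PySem

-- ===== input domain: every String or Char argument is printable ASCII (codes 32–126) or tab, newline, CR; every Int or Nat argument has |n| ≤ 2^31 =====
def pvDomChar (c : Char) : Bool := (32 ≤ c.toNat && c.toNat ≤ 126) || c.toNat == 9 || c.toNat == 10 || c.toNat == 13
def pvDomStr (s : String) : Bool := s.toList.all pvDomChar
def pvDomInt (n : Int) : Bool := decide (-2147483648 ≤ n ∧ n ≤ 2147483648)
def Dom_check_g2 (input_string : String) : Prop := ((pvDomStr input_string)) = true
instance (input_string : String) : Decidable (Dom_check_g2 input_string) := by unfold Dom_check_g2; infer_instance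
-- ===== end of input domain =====

-- B replaces A's four separate library scans and its special case by one two-phase forward scan (alternative decomposition, same asymptotic cost).

-- ===== PORT A =====
def check_g2 (input_string : String) : Bool :=
  if input_string == "b" then true
  else if !(input_string.toList.all (fun c => PySem.Str.isIn (String.ofList [c]) "ab")) then false
  else if PySem.Str.isIn "ba" input_string then false
  else
    let a_count := PySem.Str.count input_string "a"
    let b_count := PySem.Str.count input_string "b"
    b_count == a_count + 1

-- ===== PORT B =====
-- phase 1 of Source B's scan: advance while the character is 'a', returning (count of leading 'a's, rest)
def pvScanA : List Char → Nat × List Char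
  | [] => (0, [])
  | c :: t => if c = 'a' then ((pvScanA t).1 + 1, (pvScanA t).2) else (0, c :: t)

-- phase 2 of Source B's scan: every remaining character must be 'b'; none = the early `return False`
def pvScanB : List Char → Option Nat
  | [] => some 0
  | c :: t => if c = 'b' then (pvScanB t).map (· + 1) else none

def check_g2_alt (input_string : String) : Bool :=
  let p := pvScanA input_string.toList
  match pvScanB p.2 with
  | none => false
  | some b => b == p.1 + 1

-- ===== PRECONDITION & SPEC =====
def Spec_check_g2 (input_string : String) (out : Bool) : Prop := out = check_g2_alt input_string
instance (input_string : String) (out : Bool) : Decidable (Spec_check_g2 input_string out) := by unfold Spec_check_g2; infer_instance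

-- ===== CLAIM (what is proved, stated in full; the proofs are below) =====
def Claim_equal_check_g2 : Prop := ∀ (input_string : String), Dom_check_g2 input_string → Spec_check_g2 input_string (check_g2 input_string)

-- ===== LEMMAS AND PROOFS =====

-- Python str.count with a single-character needle counts character occurrences
theorem pvCountGoSingle (c : Char) : ∀ (l : List Char) (fuel acc : Nat), l.length ≤ fuel →
    PySem.Chars.count.go [c] fuel l acc = acc + l.count c := by
  intro l
  induction l with
  | nil => intro fuel acc h; cases fuel <;> simp [PySem.Chars.count.go]
  | cons h t ih =>
    intro fuel acc hle
    cases fuel with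
    | zero => simp at hle
    | succ f =>
      simp only [PySem.Chars.count.go]
      by_cases hc : h = c
      · subst hc
        simp [List.isPrefixOf, ih f (acc + 1) (by simpa using hle)]
        omega
      · simp [List.isPrefixOf, hc, ih f acc (by simpa using hle), Ne.symm hc]

theorem pvCountSingle (l : List Char) (c : Char) : PySem.Chars.count l [c] = l.count c := by
  simp [PySem.Chars.count, pvCountGoSingle c l l.length 0 le_rfl]

theorem pvIsInSingleton (c : Char) (s : List Char) : PySem.Chars.isIn [c] s = true ↔ c ∈ s := by
  rw [PySem.Chars.isIn_iff_infix]
  constructor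
  · intro h; exact h.subset (List.mem_singleton_self c)
  · intro h
    obtain ⟨u, v, rfl⟩ := List.append_of_mem h
    exact ⟨u, v, by simp⟩

-- scanA decomposes the input as leading 'a's plus a rest not starting with 'a'
theorem pvScanA_spec (l : List Char) :
    l = List.replicate (pvScanA l).1 'a' ++ (pvScanA l).2 ∧
      ∀ c t, (pvScanA l).2 = c :: t → c ≠ 'a' := by
  induction l with
  | nil => simp [pvScanA]
  | cons h t ih =>
    by_cases hc : h = 'a'
    · subst hc
      have e : pvScanA ('a' :: t) = ((pvScanA t).1 + 1, (pvScanA t).2) := by simp [pvScanA]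
      rw [e]
      exact ⟨by rw [List.replicate_succ, List.cons_append]; exact congrArg _ ih.1, ih.2⟩
    · simp only [pvScanA, if_neg hc]
      exact ⟨by simp, fun c t' h' => by cases h'; exact hc⟩

theorem pvScanA_replicate_append (n : Nat) (r : List Char) :
    pvScanA (List.replicate n 'a' ++ r) = ((pvScanA r).1 + n, (pvScanA r).2) := by
  induction n with
  | zero => simp
  | succ k ih => simp [List.replicate_succ, pvScanA, ih]; omega

theorem pvScanB_spec (r : List Char) (b : Nat) :
    pvScanB r = some b ↔ r = List.replicate b 'b' := by
  induction r generalizing b with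
  | nil => cases b <;> simp [pvScanB]
  | cons h t ih =>
    by_cases hb : h = 'b'
    · subst hb
      have e : pvScanB ('b' :: t) = (pvScanB t).map (· + 1) := by simp [pvScanB]
      rw [e]
      cases b with
      | zero =>
        constructor
        · intro h'
          obtain ⟨a, _, hk⟩ := Option.map_eq_some_iff.mp h'
          omega
        · intro h'; simp at h'
      | succ k =>
        constructor
        · intro h'
          obtain ⟨a, ha, hk⟩ := Option.map_eq_some_iff.mp h'
          have hak : a = k := by omega
          subst hak
          rw [List.replicate_succ, (ih a).mp ha]
        · intro h'
          rw [List.replicate_succ] at h'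
          have ht : t = List.replicate k 'b' := (List.cons_eq_cons.mp h').2
          rw [(ih k).mpr ht]
          rfl
    · have e : pvScanB (h :: t) = none := by simp [pvScanB, hb]
      rw [e]
      constructor
      · intro h'; simp at h'
      · intro h'
        cases b with
        | zero => simp at h'
        | succ k =>
          rw [List.replicate_succ] at h'
          exact absurd (List.cons_eq_cons.mp h').1 hb

-- B accepts exactly a^n b^(n+1)
theorem pvAlt_iff (l : List Char) :
    (match pvScanB (pvScanA l).2 with
      | none => false
      | some b => (b == (pvScanA l).1 + 1)) = true ↔
    ∃ n, l = List.replicate n 'a' ++ List.replicate (n + 1) 'b' := by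
  constructor
  · intro h
    cases hs : pvScanB (pvScanA l).2 with
    | none => rw [hs] at h; simp at h
    | some b =>
      rw [hs] at h; simp at h
      refine ⟨(pvScanA l).1, ?_⟩
      conv_lhs => rw [(pvScanA_spec l).1]
      rw [(pvScanB_spec _ b).mp hs, h]
  · rintro ⟨n, rfl⟩
    have h1 : pvScanA (List.replicate n 'a' ++ List.replicate (n + 1) 'b') =
        (n, List.replicate (n + 1) 'b') := by
      rw [pvScanA_replicate_append]
      simp [List.replicate_succ, pvScanA]
    rw [h1]
    have h2 : pvScanB (List.replicate (n + 1) 'b') = some (n + 1) :=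
      (pvScanB_spec _ _).mpr rfl
    simp [h2]

-- no "ba" inside a^i b^j
theorem pvNoBA (i j : Nat) : ¬ ['b', 'a'] <:+: (List.replicate i 'a' ++ List.replicate j 'b') := by
  induction i with
  | zero =>
    intro h
    have : 'a' ∈ List.replicate j 'b' := by
      have := h.subset (by simp : 'a' ∈ ['b', 'a'])
      simpa using this
    simp at this
  | succ k ih =>
    intro h
    rw [List.replicate_succ, List.cons_append] at h
    rcases List.infix_cons_iff.mp h with hp | ht
    · obtain ⟨t, ht⟩ := hp
      simp at ht
    · exact ih ht

-- all-ab and no-"ba" force the shape a^(count a) b^(count b)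
theorem pvShape (l : List Char) (hab : ∀ c ∈ l, c = 'a' ∨ c = 'b')
    (hba : ¬ ['b', 'a'] <:+: l) :
    l = List.replicate (l.count 'a') 'a' ++ List.replicate (l.count 'b') 'b' := by
  induction l with
  | nil => simp
  | cons h t ih =>
    have hab' : ∀ c ∈ t, c = 'a' ∨ c = 'b' := fun c hc => hab c (List.mem_cons_of_mem _ hc)
    have hba' : ¬ ['b', 'a'] <:+: t := fun hx => hba (hx.trans (List.suffix_cons h t).isInfix)
    have iht := ih hab' hba'
    rcases hab h List.mem_cons_self with rfl | rfl
    · have c1 : ('a' :: t).count 'a' = t.count 'a' + 1 := List.count_cons_self ..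
      have c2 : ('a' :: t).count 'b' = t.count 'b' := by simp
      rw [c1, c2, List.replicate_succ, List.cons_append]
      exact congrArg _ iht
    · -- head is 'b': t can contain no 'a', else "ba" would occur
      have hta : t.count 'a' = 0 := by
        by_contra hne
        apply hba
        obtain ⟨k, hk⟩ : ∃ k, t.count 'a' = k + 1 := ⟨t.count 'a' - 1, by omega⟩
        rw [hk] at iht
        refine ⟨[], List.replicate k 'a' ++ List.replicate (t.count 'b') 'b', ?_⟩
        rw [iht]
        simp [List.replicate_succ, List.count_replicate]
      have c1 : ('b' :: t).count 'a' = 0 := by simp [hta]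
      have c2 : ('b' :: t).count 'b' = t.count 'b' + 1 := List.count_cons_self ..
      rw [c1, c2, iht, hta]
      simp [List.replicate_succ]

-- A's else-branch equals the shape condition
theorem pvA_iff (l : List Char)
    (hall : l.all (fun c => PySem.Chars.isIn [c] ['a', 'b']) = true)
    (hnoba : PySem.Chars.isIn ['b', 'a'] l = false) :
    ((l.count 'b' == l.count 'a' + 1) = true ↔
      ∃ n, l = List.replicate n 'a' ++ List.replicate (n + 1) 'b') := by
  have hab : ∀ c ∈ l, c = 'a' ∨ c = 'b' := by
    intro c hc
    have h1 := (pvIsInSingleton c _).mp ((List.all_eq_true.mp hall) c hc)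
    simpa using h1
  have hba : ¬ ['b', 'a'] <:+: l := (PySem.Chars.isIn_eq_false_iff _ _).mp hnoba
  constructor
  · intro h
    have hcnt : l.count 'b' = l.count 'a' + 1 := by simpa using h
    refine ⟨l.count 'a', ?_⟩
    rw [← hcnt]
    exact pvShape l hab hba
  · rintro ⟨n, rfl⟩
    simp [List.count_append, List.count_replicate]

theorem pvAltList_eval (s : String) : check_g2_alt s =
    (match pvScanB (pvScanA s.toList).2 with
      | none => false
      | some b => (b == (pvScanA s.toList).1 + 1)) := rfl

-- ===== VERDICT (by name: the statement is the Claim_ definition above) =====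
theorem check_g2_spec : Claim_equal_check_g2 := by
  intro s _
  unfold Spec_check_g2
  rw [pvAltList_eval]
  unfold check_g2
  by_cases hb : s = "b"
  · subst hb; decide
  · rw [if_neg (by simpa using hb)]
    by_cases hall : s.toList.all (fun c => PySem.Str.isIn (String.ofList [c]) "ab") = true
    · rw [hall]
      simp only [Bool.not_true, Bool.false_eq_true, if_false]
      have hall' : s.toList.all (fun c => PySem.Chars.isIn [c] ['a', 'b']) = true := by
        simpa [PySem.Str.isIn] using hall
      by_cases hba : PySem.Str.isIn "ba" s = true
      · rw [if_pos hba]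
        -- A returns false; show B does too
        have hinf : ['b', 'a'] <:+: s.toList := by
          have := (PySem.Str.isIn_iff_infix _ _).mp hba
          simpa using this
        cases hs : pvScanB (pvScanA s.toList).2 with
        | none => simp
        | some b =>
          simp only
          cases hcmp : (b == (pvScanA s.toList).1 + 1) with
          | false => rfl
          | true =>
            exfalso
            have hsh : ∃ n, s.toList = List.replicate n 'a' ++ List.replicate (n + 1) 'b' := by
              apply (pvAlt_iff s.toList).mp
              rw [hs]; exact hcmp
            obtain ⟨n, hn⟩ := hsh
            rw [hn] at hinf
            exact pvNoBA _ _ hinf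
      · rw [if_neg hba]
        have hnoba : PySem.Chars.isIn ['b', 'a'] s.toList = false := by
          have hf : PySem.Str.isIn "ba" s = false := Bool.eq_false_iff.mpr hba
          simpa [PySem.Str.isIn] using hf
        have hcnt : PySem.Str.count s "a" = s.toList.count 'a' := by
          rw [PySem.Str.count_eq]; exact pvCountSingle _ _
        have hcntb : PySem.Str.count s "b" = s.toList.count 'b' := by
          rw [PySem.Str.count_eq]; exact pvCountSingle _ _
        simp only [hcnt, hcntb]
        rw [Bool.eq_iff_iff, pvA_iff s.toList hall' hnoba, pvAlt_iff s.toList]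
    · rw [Bool.not_eq_true] at hall
      rw [hall]
      simp only [Bool.not_false, if_true]
      -- A returns false because some character is not 'a'/'b'; B rejects too
      obtain ⟨c, hc, hcp⟩ := List.all_eq_false.mp hall
      have hm : c ∉ (['a', 'b'] : List Char) := by
        intro hmem
        exact hcp (by simpa [PySem.Str.isIn] using (pvIsInSingleton c ['a', 'b']).mpr hmem)
      have hca : c ≠ 'a' := fun h => hm (h ▸ (by simp))
      have hcb : c ≠ 'b' := fun h => hm (h ▸ (by simp))
      cases hs : pvScanB (pvScanA s.toList).2 with
      | none => simp
      | some b =>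
        simp only
        cases hcmp : (b == (pvScanA s.toList).1 + 1) with
        | false => rfl
        | true =>
          exfalso
          have hsh : ∃ n, s.toList = List.replicate n 'a' ++ List.replicate (n + 1) 'b' := by
            apply (pvAlt_iff s.toList).mp
            rw [hs]; exact hcmp
          obtain ⟨n, hn⟩ := hsh
          rw [hn] at hc
          rcases List.mem_append.mp hc with h | h
          · exact hca (List.eq_of_mem_replicate h)
          · exact hcb (List.eq_of_mem_replicate h)
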